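-- pv_equiv track=rewrite | github.com/brianyla/gamedevbench | Data/scripts/generate_task_artifacts.py | first_relevant_scene
-- ===== SOURCE A (Python) =====
-- from typing import Any, Dict, List, Optional, Tuple
--
-- def first_relevant_scene(candidate_files: List[str]) -> Optional[str]:
--     scene_files = [path for path in candidate_files if path.endswith(".tscn")]
--     if not scene_files:
--         return None
--     for prefix in ("controllers/", "levels/", "ui/"):
--         for path in scene_files:
--             if path.startswith(prefix):
--                 return path
--     return scene_files[0]
-- ===== SOURCE B (Python) =====
-- from typing import List, Optional
--
-- def _priority(path: str) -> int:
--     if path.startswith("controllers/"):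
--         return 0
--     if path.startswith("levels/"):
--         return 1
--     if path.startswith("ui/"):
--         return 2
--     return 3
--
-- def first_relevant_scene(candidate_files: List[str]) -> Optional[str]:
--     best: Optional[str] = None
--     best_pri = 4
--     for path in candidate_files:
--         if path.endswith(".tscn"):
--             p = _priority(path)
--             if p < best_pri:
--                 best, best_pri = path, p
--     return best
-- ===== Notes on version B (the rewrite author's own statement) =====
-- stated objective: simpler
-- what changed: Replaces filter-then-three-prefix-ordered-scans (plus fallback indexing) with one pass that tracks the best (lowest-priority) .tscn path seen so far, updating only on strictly smaller priority.
import Mathlib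
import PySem

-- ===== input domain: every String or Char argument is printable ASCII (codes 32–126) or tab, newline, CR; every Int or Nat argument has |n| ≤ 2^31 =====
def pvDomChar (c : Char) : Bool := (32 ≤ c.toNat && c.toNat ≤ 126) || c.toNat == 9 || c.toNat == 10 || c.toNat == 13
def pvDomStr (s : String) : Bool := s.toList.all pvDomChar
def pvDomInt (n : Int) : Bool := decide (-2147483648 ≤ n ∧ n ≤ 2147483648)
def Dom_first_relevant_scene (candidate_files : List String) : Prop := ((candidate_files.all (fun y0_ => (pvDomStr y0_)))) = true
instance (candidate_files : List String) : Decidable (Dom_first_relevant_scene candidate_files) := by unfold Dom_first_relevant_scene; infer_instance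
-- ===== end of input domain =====

-- B replaces A's filter plus three priority-ordered scans (and fallback indexing) by one
-- pass tracking the best .tscn path so far; objective: simpler.

-- ===== PORT A =====
-- the 'for prefix in (...)' loop with early return over the inner scan
def pvLoopPre (scene_files : List String) : List String → Option String
  | [] => none
  | pre :: rest =>
    match scene_files.find? (fun path => PySem.Str.startswith path pre) with
    | some path => some path
    | none => pvLoopPre scene_files rest

def first_relevant_scene (candidate_files : List String) : Option String :=
  let scene_files := candidate_files.filter (fun path => PySem.Str.endswith path ".tscn")
  if scene_files.isEmpty then none
  else
    match pvLoopPre scene_files ["controllers/", "levels/", "ui/"] with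
    | some path => some path
    | none => PySem.List.pyGet? scene_files 0   -- scene_files[0]; list nonempty here

-- ===== PORT B =====
def pvPriority (path : String) : Nat :=
  if PySem.Str.startswith path "controllers/" then 0
  else if PySem.Str.startswith path "levels/" then 1
  else if PySem.Str.startswith path "ui/" then 2
  else 3

def pvBStep (st : Option String × Nat) (path : String) : Option String × Nat :=
  if PySem.Str.endswith path ".tscn" then
    if pvPriority path < st.2 then (some path, pvPriority path) else st
  else st

def first_relevant_scene_alt (candidate_files : List String) : Option String :=
  (candidate_files.foldl pvBStep ((none : Option String), 4)).1

-- ===== PRECONDITION & SPEC =====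
def Spec_first_relevant_scene (candidate_files : List String) (out : Option String) : Prop := out = first_relevant_scene_alt candidate_files
instance (candidate_files : List String) (out : Option String) : Decidable (Spec_first_relevant_scene candidate_files out) := by unfold Spec_first_relevant_scene; infer_instance

-- ===== CLAIM (what is proved, stated in full; the proofs are below) =====
def Claim_equal_first_relevant_scene : Prop := ∀ (candidate_files : List String), Dom_first_relevant_scene candidate_files → Spec_first_relevant_scene candidate_files (first_relevant_scene candidate_files)

-- ===== LEMMAS AND PROOFS =====

-- the pure best-so-far step, after the .tscn filter has been pulled out
def pvStep (st : Option String × Nat) (path : String) : Option String × Nat :=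
  if pvPriority path < st.2 then (some path, pvPriority path) else st

-- folding pvBStep over the whole list = folding pvStep over the .tscn-filtered list
theorem pvFoldFilter (l : List String) (st : Option String × Nat) :
    l.foldl pvBStep st = (l.filter (fun path => PySem.Str.endswith path ".tscn")).foldl pvStep st := by
  induction l generalizing st with
  | nil => rfl
  | cons x t ih =>
    by_cases h : PySem.Str.endswith x ".tscn" = true
    · rw [List.foldl_cons, ih, List.filter_cons, if_pos h, List.foldl_cons]
      congr 1
      unfold pvBStep pvStep
      rw [if_pos h]
    · rw [List.foldl_cons, ih, List.filter_cons, if_neg h]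
      congr 1
      unfold pvBStep
      rw [if_neg h]

def pvMin (a : Nat) (s : List String) : Nat := s.foldl (fun m x => min m (pvPriority x)) a

theorem pvMin_le_init (s : List String) (a : Nat) : pvMin a s ≤ a := by
  induction s generalizing a with
  | nil => simp [pvMin]
  | cons x t ih =>
    exact le_trans (ih (min a (pvPriority x))) (min_le_left _ _)

theorem pvMin_le_mem (s : List String) (a : Nat) (x : String) (hx : x ∈ s) :
    pvMin a s ≤ pvPriority x := by
  induction s generalizing a with
  | nil => cases hx
  | cons y t ih =>
    rcases List.mem_cons.mp hx with h | h
    · subst h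
      exact le_trans (pvMin_le_init t _) (min_le_right _ _)
    · exact ih _ h

theorem pvMin_lower (s : List String) (a c : Nat) (ha : c ≤ a)
    (h : ∀ x ∈ s, c ≤ pvPriority x) : c ≤ pvMin a s := by
  induction s generalizing a with
  | nil => simpa [pvMin] using ha
  | cons x t ih =>
    exact ih _ (le_min ha (h x (List.mem_cons_self))) (fun y hy => h y (List.mem_cons_of_mem _ hy))

-- characterisation of the best-so-far fold
theorem pvFold_char (s : List String) (b : Option String) (bp : Nat) :
    (s.foldl pvStep (b, bp)).1 =
      if pvMin bp s = bp then b else s.find? (fun x => pvPriority x == pvMin bp s) := by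
  induction s generalizing b bp with
  | nil => simp [pvMin]
  | cons x t ih =>
    by_cases h : pvPriority x < bp
    · have hmin : min bp (pvPriority x) = pvPriority x := by omega
      have hm : pvMin bp (x :: t) = pvMin (pvPriority x) t := by
        simp [pvMin, hmin]
      have hle : pvMin (pvPriority x) t ≤ pvPriority x := pvMin_le_init t _
      rw [List.foldl_cons, pvStep, if_pos h, ih, hm]
      by_cases he : pvMin (pvPriority x) t = pvPriority x
      · have hne : pvMin (pvPriority x) t ≠ bp := by omega
        rw [if_pos he, if_neg hne, List.find?_cons]
        simp [he]
      · have hne : pvMin (pvPriority x) t ≠ bp := by omega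
        have hxne : (pvPriority x == pvMin (pvPriority x) t) = false := by
          simp; omega
        rw [if_neg he, if_neg hne, List.find?_cons, hxne]
    · have hmin : min bp (pvPriority x) = bp := by omega
      have hm : pvMin bp (x :: t) = pvMin bp t := by simp [pvMin, hmin]
      rw [List.foldl_cons, pvStep, if_neg h, ih, hm]
      by_cases he : pvMin bp t = bp
      · rw [if_pos he, if_pos he]
      · have hlt : pvMin bp t < bp := lt_of_le_of_ne (pvMin_le_init t bp) he
        have hxne : (pvPriority x == pvMin bp t) = false := by
          simp; omega
        rw [if_neg he, if_neg he, List.find?_cons, hxne]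

-- find? congruence on members
theorem pvFind_congr (s : List String) (p q : String → Bool)
    (h : ∀ x ∈ s, p x = q x) : s.find? p = s.find? q := by
  induction s with
  | nil => rfl
  | cons x t ih =>
    rw [List.find?_cons, List.find?_cons, h x (List.mem_cons_self)]
    cases q x
    · exact ih (fun y hy => h y (List.mem_cons_of_mem _ hy))
    · rfl

theorem pvPri_eq_zero (x : String) :
    (pvPriority x == 0) = PySem.Str.startswith x "controllers/" := by
  unfold pvPriority; split_ifs <;> simp_all

theorem pvPri_eq_one (x : String) (h0 : PySem.Str.startswith x "controllers/" = false) :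
    (pvPriority x == 1) = PySem.Str.startswith x "levels/" := by
  unfold pvPriority; split_ifs <;> simp_all

theorem pvPri_eq_two (x : String) (h0 : PySem.Str.startswith x "controllers/" = false)
    (h1 : PySem.Str.startswith x "levels/" = false) :
    (pvPriority x == 2) = PySem.Str.startswith x "ui/" := by
  unfold pvPriority; split_ifs <;> simp_all

theorem pvPri_le_three (x : String) : pvPriority x ≤ 3 := by
  unfold pvPriority; split_ifs <;> omega

-- ===== VERDICT (by name: the statement is the Claim_ definition above) =====
theorem first_relevant_scene_spec : Claim_equal_first_relevant_scene := by
  intro cf _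
  unfold Spec_first_relevant_scene first_relevant_scene first_relevant_scene_alt
  rw [pvFoldFilter, pvFold_char]
  generalize hs : cf.filter (fun path => PySem.Str.endswith path ".tscn") = s
  by_cases hemp : s.isEmpty = true
  · have : s = [] := List.isEmpty_iff.mp hemp
    subst this
    simp [pvMin]
  · obtain ⟨y, t, hsc⟩ : ∃ y t, s = y :: t := by
      cases s with
      | nil => exact absurd rfl hemp
      | cons a b => exact ⟨a, b, rfl⟩
    have hym : y ∈ s := by rw [hsc]; exact List.mem_cons_self
    have hm_le : pvMin 4 s ≤ 3 :=
      le_trans (pvMin_le_mem s 4 y hym) (pvPri_le_three y)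
    have hm4 : pvMin 4 s ≠ 4 := by omega
    rw [if_neg hemp, if_neg hm4]
    cases hf0 : s.find? (fun path => PySem.Str.startswith path "controllers/") with
    | some x =>
      have hx := List.find?_some hf0
      have hxm : x ∈ s := List.mem_of_find?_eq_some hf0
      have hp0 : pvPriority x = 0 := by unfold pvPriority; rw [if_pos hx]
      have hm0 : pvMin 4 s = 0 := by
        have := pvMin_le_mem s 4 x hxm
        omega
      have hloop : pvLoopPre s ["controllers/", "levels/", "ui/"] = some x := by
        simp only [pvLoopPre, hf0]
      rw [hloop, hm0,
        pvFind_congr s _ _ (fun z _ => pvPri_eq_zero z), hf0]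
    | none =>
      have hno0 : ∀ z ∈ s, PySem.Str.startswith z "controllers/" = false := by
        intro z hz
        have := List.find?_eq_none.mp hf0 z hz
        exact Bool.not_eq_true _ ▸ this
      have hge1 : ∀ z ∈ s, 1 ≤ pvPriority z := by
        intro z hz
        unfold pvPriority
        rw [if_neg (by rw [hno0 z hz]; exact Bool.false_ne_true)]
        split_ifs <;> omega
      cases hf1 : s.find? (fun path => PySem.Str.startswith path "levels/") with
      | some x =>
        have hx := List.find?_some hf1
        have hxm : x ∈ s := List.mem_of_find?_eq_some hf1
        have hp1 : pvPriority x = 1 := by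
          unfold pvPriority
          rw [if_neg (by rw [hno0 x hxm]; exact Bool.false_ne_true), if_pos hx]
        have hm1 : pvMin 4 s = 1 := by
          have h1 := pvMin_lower s 4 1 (by omega) hge1
          have h2 := pvMin_le_mem s 4 x hxm
          omega
        have hloop : pvLoopPre s ["controllers/", "levels/", "ui/"] = some x := by
          simp only [pvLoopPre, hf0, hf1]
        rw [hloop, hm1,
          pvFind_congr s _ _ (fun z hz => pvPri_eq_one z (hno0 z hz)), hf1]
      | none =>
        have hno1 : ∀ z ∈ s, PySem.Str.startswith z "levels/" = false := by
          intro z hz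
          have := List.find?_eq_none.mp hf1 z hz
          exact Bool.not_eq_true _ ▸ this
        have hge2 : ∀ z ∈ s, 2 ≤ pvPriority z := by
          intro z hz
          unfold pvPriority
          rw [if_neg (by rw [hno0 z hz]; exact Bool.false_ne_true), if_neg (by rw [hno1 z hz]; exact Bool.false_ne_true)]
          split_ifs <;> omega
        cases hf2 : s.find? (fun path => PySem.Str.startswith path "ui/") with
        | some x =>
          have hx := List.find?_some hf2
          have hxm : x ∈ s := List.mem_of_find?_eq_some hf2
          have hp2 : pvPriority x = 2 := by
            unfold pvPriority
            rw [if_neg (by rw [hno0 x hxm]; exact Bool.false_ne_true), if_neg (by rw [hno1 x hxm]; exact Bool.false_ne_true), if_pos hx]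
          have hm2 : pvMin 4 s = 2 := by
            have h1 := pvMin_lower s 4 2 (by omega) hge2
            have h2 := pvMin_le_mem s 4 x hxm
            omega
          have hloop : pvLoopPre s ["controllers/", "levels/", "ui/"] = some x := by
            simp only [pvLoopPre, hf0, hf1, hf2]
          rw [hloop, hm2,
            pvFind_congr s _ _ (fun z hz => pvPri_eq_two z (hno0 z hz) (hno1 z hz)), hf2]
        | none =>
          have hno2 : ∀ z ∈ s, PySem.Str.startswith z "ui/" = false := by
            intro z hz
            have := List.find?_eq_none.mp hf2 z hz
            exact Bool.not_eq_true _ ▸ this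
          have hge3 : ∀ z ∈ s, 3 ≤ pvPriority z := by
            intro z hz
            unfold pvPriority
            rw [if_neg (by rw [hno0 z hz]; exact Bool.false_ne_true), if_neg (by rw [hno1 z hz]; exact Bool.false_ne_true),
              if_neg (by rw [hno2 z hz]; exact Bool.false_ne_true)]
          have hm3 : pvMin 4 s = 3 := by
            have := pvMin_lower s 4 3 (by omega) hge3
            omega
          have hp3 : pvPriority y = 3 := by
            have h1 := hge3 y hym
            have h2 := pvPri_le_three y
            omega
          have hloop : pvLoopPre s ["controllers/", "levels/", "ui/"] = none := by
            simp only [pvLoopPre, hf0, hf1, hf2]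
          rw [hloop, hm3, hsc, List.find?_cons]
          simp [hp3, PySem.List.pyGet?, PySem.List.pyIdx?]
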